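-- pv_equiv track=rewrite | github.com/suUdong/figure-mcp | packages/document-processor/src/processors/text_processor.py | _analyze_yaml
-- ===== SOURCE A (Python) =====
-- from typing import Dict, Any, List
--
-- def _analyze_yaml(content: str) -> Dict[str, Any]:
--     """YAML 파일 분석"""
--     lines = content.split('\n')
--
--     # 들여쓰기 레벨 분석
--     indent_levels = []
--     for line in lines:
--         if line.strip() and not line.strip().startswith('#'):
--             leading_spaces = len(line) - len(line.lstrip())
--             if leading_spaces > 0:
--                 indent_levels.append(leading_spaces)
--
--     # 키-값 쌍 개수
--     key_value_pairs = sum(1 for line in lines if ':' in line and not line.strip().startswith('#'))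
--
--     # 리스트 아이템 개수
--     list_items = sum(1 for line in lines if line.strip().startswith('-'))
--
--     return {
--         'yaml_analysis': {
--             'key_value_pairs': key_value_pairs,
--             'list_items': list_items,
--             'max_indent_level': max(indent_levels) if indent_levels else 0,
--             'comment_lines': sum(1 for line in lines if line.strip().startswith('#'))
--         }
--     }
-- ===== SOURCE B (Python) =====
-- def _analyze_yaml(content: str):
--     """YAML analysis in one pass over the lines (four accumulators, no intermediate list)."""
--     key_value_pairs = 0
--     list_items = 0
--     comment_lines = 0
--     max_indent = 0
--     for line in content.split('\n'):
--         stripped = line.strip()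
--         is_comment = stripped.startswith('#')
--         if is_comment:
--             comment_lines += 1
--         elif stripped:
--             leading = len(line) - len(line.lstrip())
--             if leading > max_indent:
--                 max_indent = leading
--         if ':' in line and not is_comment:
--             key_value_pairs += 1
--         if stripped.startswith('-'):
--             list_items += 1
--     return {
--         'yaml_analysis': {
--             'key_value_pairs': key_value_pairs,
--             'list_items': list_items,
--             'max_indent_level': max_indent,
--             'comment_lines': comment_lines,
--         }
--     }
-- ===== Notes on version B (the rewrite author's own statement) =====
-- stated objective: simpler
-- what changed: A's four separate scans over the lines (plus an intermediate indent-level list fed to max) are fused into one loop maintaining four scalar accumulators with a running maximum.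
import Mathlib
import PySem

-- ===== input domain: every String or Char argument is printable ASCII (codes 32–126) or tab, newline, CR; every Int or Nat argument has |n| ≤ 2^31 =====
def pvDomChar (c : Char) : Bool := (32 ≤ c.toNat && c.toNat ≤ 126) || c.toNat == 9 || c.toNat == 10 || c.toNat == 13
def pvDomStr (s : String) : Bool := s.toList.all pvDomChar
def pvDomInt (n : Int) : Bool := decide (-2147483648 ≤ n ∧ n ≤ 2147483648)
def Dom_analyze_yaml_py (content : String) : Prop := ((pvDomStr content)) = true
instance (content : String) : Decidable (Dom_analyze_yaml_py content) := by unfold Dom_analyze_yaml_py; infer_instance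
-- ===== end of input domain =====

-- B fuses A's four separate scans over the lines (and A's intermediate indent-level
-- list fed to max) into one pass with four scalar accumulators; objective: simpler.

-- ===== PORT A =====
-- A: four independent passes over the lines; indent levels collected in a list, then max.
def analyze_yaml_py (content : String) : List (String × List (String × Int)) :=
  let lines := (PySem.Str.split? content "\n").getD []   -- content.split('\n'); sep ≠ "" so never none
  let indent_levels : List Int := lines.foldl (fun acc line =>
    if PySem.Str.len (PySem.Str.strip line) != 0 &&        -- truthiness of line.strip()
       !(PySem.Str.startswith (PySem.Str.strip line) "#") then
      (if PySem.Str.len line - PySem.Str.len (PySem.Str.lstrip line) > 0    -- leading_spaces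
       then acc ++ [PySem.Str.len line - PySem.Str.len (PySem.Str.lstrip line)] else acc)
    else acc) []
  let key_value_pairs : Int := lines.foldl (fun a line =>
    if PySem.Str.isIn ":" line && !(PySem.Str.startswith (PySem.Str.strip line) "#") then a + 1 else a) 0
  let list_items : Int := lines.foldl (fun a line =>
    if PySem.Str.startswith (PySem.Str.strip line) "-" then a + 1 else a) 0
  let comment_lines : Int := lines.foldl (fun a line =>
    if PySem.Str.startswith (PySem.Str.strip line) "#" then a + 1 else a) 0
  let max_indent : Int :=
    if indent_levels.isEmpty then 0
    else (PySem.List.max? indent_levels (fun x => x)).getD 0   -- max(indent_levels), list nonempty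
  [("yaml_analysis",
    [("key_value_pairs", key_value_pairs), ("list_items", list_items),
     ("max_indent_level", max_indent), ("comment_lines", comment_lines)])]

-- ===== PORT B =====
-- B's loop body: one step over a line, carrying (key_value_pairs, list_items, comment_lines, max_indent).
def analyzeYamlStep (st : Int × Int × Int × Int) (line : String) : Int × Int × Int × Int :=
  let stripped := PySem.Str.strip line
  let isComment := PySem.Str.startswith stripped "#"
  let cm := if isComment then st.2.2.1 + 1 else st.2.2.1
  let mx := if !isComment && PySem.Str.len stripped != 0 then
              (if PySem.Str.len line - PySem.Str.len (PySem.Str.lstrip line) > st.2.2.2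
               then PySem.Str.len line - PySem.Str.len (PySem.Str.lstrip line) else st.2.2.2)
            else st.2.2.2
  let kv := if PySem.Str.isIn ":" line && !isComment then st.1 + 1 else st.1
  let li := if PySem.Str.startswith stripped "-" then st.2.1 + 1 else st.2.1
  (kv, li, cm, mx)

def analyze_yaml_py_alt (content : String) : List (String × List (String × Int)) :=
  let st := ((PySem.Str.split? content "\n").getD []).foldl analyzeYamlStep (0, 0, 0, 0)
  [("yaml_analysis",
    [("key_value_pairs", st.1), ("list_items", st.2.1),
     ("max_indent_level", st.2.2.2), ("comment_lines", st.2.2.1)])]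

-- ===== PRECONDITION & SPEC =====
def Spec_analyze_yaml_py (content : String) (out : List (String × List (String × Int))) : Prop := out = analyze_yaml_py_alt content
instance (content : String) (out : List (String × List (String × Int))) : Decidable (Spec_analyze_yaml_py content out) := by unfold Spec_analyze_yaml_py; infer_instance

-- ===== CLAIM (what is proved, stated in full; the proofs are below) =====
def Claim_equal_analyze_yaml_py : Prop := ∀ (content : String), Dom_analyze_yaml_py content → Spec_analyze_yaml_py content (analyze_yaml_py content)

-- ===== LEMMAS AND PROOFS =====

-- A's indent-level collection step, named for the proofs (identical to the lambda in port A)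
def pvIdStep (acc : List Int) (line : String) : List Int :=
  if PySem.Str.len (PySem.Str.strip line) != 0 &&
     !(PySem.Str.startswith (PySem.Str.strip line) "#") then
    (if PySem.Str.len line - PySem.Str.len (PySem.Str.lstrip line) > 0
     then acc ++ [PySem.Str.len line - PySem.Str.len (PySem.Str.lstrip line)] else acc)
  else acc

-- B's running-max step (the fourth component of analyzeYamlStep)
def pvMxStep (mx : Int) (line : String) : Int :=
  if !(PySem.Str.startswith (PySem.Str.strip line) "#") && PySem.Str.len (PySem.Str.strip line) != 0 then
    (if PySem.Str.len line - PySem.Str.len (PySem.Str.lstrip line) > mx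
     then PySem.Str.len line - PySem.Str.len (PySem.Str.lstrip line) else mx)
  else mx

-- one line: folding max over what A appends = B's conditional running-max update
lemma pvStep (line : String) (acc : List Int) (mx : Int) (hmx : 0 ≤ mx) :
    (pvIdStep acc line).foldl max mx = pvMxStep (acc.foldl max mx) line := by
  have hF := (PySem.List.le_foldl_max acc mx).1
  unfold pvIdStep pvMxStep
  cases hS : PySem.Str.startswith (PySem.Str.strip line) "#" <;>
    cases hE : (PySem.Str.len (PySem.Str.strip line) != 0) <;>
      simp only [hS, hE, Bool.not_true, Bool.not_false, Bool.true_and, Bool.and_false,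
        Bool.false_and, Bool.and_true, Bool.false_eq_true, reduceIte]
  by_cases hl : PySem.Str.len line - PySem.Str.len (PySem.Str.lstrip line) > 0
  · rw [if_pos hl, List.foldl_append, List.foldl_cons, List.foldl_nil, Int.max_def]
    split_ifs <;> omega
  · rw [if_neg hl, if_neg (by omega)]

lemma pvMax_fold (l : List String) : ∀ (acc : List Int) (mx : Int), 0 ≤ mx →
    (l.foldl pvIdStep acc).foldl max mx = l.foldl pvMxStep (acc.foldl max mx) := by
  induction l with
  | nil => intro acc mx _; rfl
  | cons line t ih =>
    intro acc mx hmx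
    simp only [List.foldl_cons]
    rw [ih _ mx hmx, pvStep line acc mx hmx]

-- every collected indent level is positive
lemma pvId_pos (l : List String) : ∀ (acc : List Int), (∀ y ∈ acc, 0 < y) →
    ∀ y ∈ l.foldl pvIdStep acc, 0 < y := by
  induction l with
  | nil => intro acc h; exact h
  | cons line t ih =>
    intro acc h
    apply ih
    intro y hy
    unfold pvIdStep at hy
    split_ifs at hy with h1 h2
    · rcases List.mem_append.1 hy with h' | h'
      · exact h y h'
      · simp only [List.mem_singleton] at h'; omega
    · exact h y hy
    · exact h y hy

-- B's single fold splits into A's four folds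
lemma pvB_fold (l : List String) : ∀ (kv li cm mx : Int),
    l.foldl analyzeYamlStep (kv, li, cm, mx) =
      (l.foldl (fun a line => if PySem.Str.isIn ":" line && !(PySem.Str.startswith (PySem.Str.strip line) "#") then a + 1 else a) kv,
       l.foldl (fun a line => if PySem.Str.startswith (PySem.Str.strip line) "-" then a + 1 else a) li,
       l.foldl (fun a line => if PySem.Str.startswith (PySem.Str.strip line) "#" then a + 1 else a) cm,
       l.foldl pvMxStep mx) := by
  induction l with
  | nil => intro kv li cm mx; rfl
  | cons line t ih =>
    intro kv li cm mx
    simp only [List.foldl_cons]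
    rw [show analyzeYamlStep (kv, li, cm, mx) line =
      ((if PySem.Str.isIn ":" line && !(PySem.Str.startswith (PySem.Str.strip line) "#") then kv + 1 else kv),
       (if PySem.Str.startswith (PySem.Str.strip line) "-" then li + 1 else li),
       (if PySem.Str.startswith (PySem.Str.strip line) "#" then cm + 1 else cm),
       pvMxStep mx line) from rfl]
    rw [ih]

-- A's max-of-collected-list equals B's running max from 0
lemma pvA_max (l : List String) :
    (if (l.foldl pvIdStep []).isEmpty then (0 : Int)
     else (PySem.List.max? (l.foldl pvIdStep []) (fun x => x)).getD 0) =
    l.foldl pvMxStep 0 := by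
  have hmf := pvMax_fold l [] 0 le_rfl
  simp only [List.foldl_nil] at hmf
  rw [← hmf]
  have hpos := pvId_pos l [] (by intro y hy; cases hy)
  cases hl : l.foldl pvIdStep [] with
  | nil => rfl
  | cons x t =>
    have hx : 0 < x := hpos x (by rw [hl]; exact List.mem_cons_self)
    rw [if_neg (by simp), PySem.List.max?_id_cons, Option.getD_some, List.foldl_cons]
    rw [show max (0 : Int) x = x by omega]

-- ===== VERDICT (by name: the statement is the Claim_ definition above) =====
theorem analyze_yaml_py_spec : Claim_equal_analyze_yaml_py := by
  intro content _
  unfold Spec_analyze_yaml_py analyze_yaml_py analyze_yaml_py_alt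
  simp only
  rw [pvB_fold]
  simp only
  rw [show (fun acc line =>
      if PySem.Str.len (PySem.Str.strip line) != 0 &&
         !(PySem.Str.startswith (PySem.Str.strip line) "#") then
        (if PySem.Str.len line - PySem.Str.len (PySem.Str.lstrip line) > 0
         then acc ++ [PySem.Str.len line - PySem.Str.len (PySem.Str.lstrip line)] else acc)
      else acc) = pvIdStep from rfl]
  rw [pvA_max]
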